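-- pv_equiv track=rewrite | github.com/KaelZhang321/AI-Business-Platform | ai-gateway/app/api/routes/api_query.py | _infer_form_state_root
-- ===== SOURCE A (Python) =====
-- def _infer_form_state_root(bind_paths: list[str]) -> str | None:
--     """根据字段绑定路径推导表单根状态路径。"""
--     if not bind_paths:
--         return None
--
--     segments_list = [[segment for segment in path.split("/") if segment] for path in bind_paths]
--     if not segments_list:
--         return None
--
--     common_segments: list[str] = []
--     for segment_group in zip(*segments_list):
--         if len(set(segment_group)) != 1:
--             break
--         common_segments.append(segment_group[0])
--
--     # 只有单字段时，完整路径会把叶子节点也算进公共前缀。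
--     # 这里主动退回一层，避免把 `/form/customerId` 误报成表单根路径。
--     if len(common_segments) == len(segments_list[0]) and len(common_segments) > 1:
--         common_segments = common_segments[:-1]
--
--     if not common_segments:
--         return None
--     return "/" + "/".join(common_segments)
-- ===== SOURCE B (Python) =====
-- def _infer_form_state_root(bind_paths: list[str]) -> str | None:
--     if not bind_paths:
--         return None
--     seg0 = [s for s in bind_paths[0].split("/") if s]
--     common = seg0
--     for path in bind_paths[1:]:
--         segs = [s for s in path.split("/") if s]
--         i = 0
--         while i < len(common) and i < len(segs) and common[i] == segs[i]:
--             i += 1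
--         common = common[:i]
--     if len(common) == len(seg0) and len(common) > 1:
--         common = common[:-1]
--     if not common:
--         return None
--     return "/" + "/".join(common)
-- ===== Notes on version B (the rewrite author's own statement) =====
-- stated objective: simpler
-- what changed: Replaces the zip(*segments_list) transpose with a set-cardinality test per column by a left fold that shortens a candidate prefix (the first path's segments) to its longest common prefix with each remaining path.
import Mathlib
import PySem

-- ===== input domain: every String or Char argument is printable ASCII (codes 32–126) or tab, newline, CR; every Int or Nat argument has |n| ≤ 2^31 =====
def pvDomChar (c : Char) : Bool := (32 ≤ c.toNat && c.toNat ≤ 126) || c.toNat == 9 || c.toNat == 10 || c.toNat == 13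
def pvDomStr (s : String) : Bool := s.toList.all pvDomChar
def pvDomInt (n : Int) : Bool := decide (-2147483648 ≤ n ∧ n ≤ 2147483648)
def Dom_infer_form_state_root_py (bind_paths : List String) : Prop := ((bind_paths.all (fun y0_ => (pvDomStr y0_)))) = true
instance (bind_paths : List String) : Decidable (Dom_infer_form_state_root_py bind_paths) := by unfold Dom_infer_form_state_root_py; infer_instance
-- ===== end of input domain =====

-- B changes the decomposition only: a fold shortening a candidate common prefix instead of a zip(*) transpose; same cost, simpler.

-- [segment for segment in path.split("/") if segment]  (used by both Pythons, same expression)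
def pvSeg (path : String) : List String :=
  -- sep "/" is a nonempty literal, so split? is always `some`
  ((PySem.Str.split? path "/").getD []).filter (fun s => s ≠ "")

-- ===== PORT A =====
-- hand port of zip(*ls): take one element from every list while all are nonempty (exact: zip stops at the shortest iterable)
def pvHeads : List (List String) → Option (List String × List (List String))
  | [] => some ([], [])
  | [] :: _ => none
  | (h :: t) :: ls =>
    match pvHeads ls with
    | some (hs, ts) => some (h :: hs, t :: ts)
    | none => none

def pvZipStarAux : List String → List (List String) → List (List String)
  | [], _ => []
  | h :: t, rest =>
    match pvHeads rest with
    | some (hs, ts) => (h :: hs) :: pvZipStarAux t ts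
    | none => []

def pvZipStar : List (List String) → List (List String)
  | [] => []
  | l :: ls => pvZipStarAux l ls

-- the for-loop over zip(*segments_list) with its break
def pvCommonLoop : List (List String) → List String
  | [] => []
  | g :: rest =>
    if PySem.Set.len (PySem.Set.ofList g) ≠ 1 then []
    else g.headD "" :: pvCommonLoop rest

def infer_form_state_root_py (bind_paths : List String) : Option String :=
  if bind_paths.isEmpty then none
  else
    let segments_list := bind_paths.map pvSeg
    if segments_list.isEmpty then none
    else
      let common_segments := pvCommonLoop (pvZipStar segments_list)
      let common_segments :=
        if common_segments.length = (segments_list.headD []).length ∧ common_segments.length > 1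
        then common_segments.dropLast else common_segments
      if common_segments.isEmpty then none
      else some ("/" ++ PySem.Str.join "/" common_segments)

-- ===== PORT B =====
-- the while loop: matching prefix of the two lists, cut at first mismatch or shorter length
def pvLcp : List String → List String → List String
  | a :: as_, b :: bs => if a = b then a :: pvLcp as_ bs else []
  | _, _ => []

def infer_form_state_root_py_alt (bind_paths : List String) : Option String :=
  match bind_paths with
  | [] => none
  | p :: rest =>
    let seg0 := pvSeg p
    let common := rest.foldl (fun c q => pvLcp c (pvSeg q)) seg0
    let common := if common.length = seg0.length ∧ common.length > 1 then common.dropLast else common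
    if common.isEmpty then none else some ("/" ++ PySem.Str.join "/" common)

-- ===== PRECONDITION & SPEC =====
def Spec_infer_form_state_root_py (bind_paths : List String) (out : Option String) : Prop := out = infer_form_state_root_py_alt bind_paths
instance (bind_paths : List String) (out : Option String) : Decidable (Spec_infer_form_state_root_py bind_paths out) := by unfold Spec_infer_form_state_root_py; infer_instance

-- ===== CLAIM (what is proved, stated in full; the proofs are below) =====
def Claim_equal_infer_form_state_root_py : Prop := ∀ (bind_paths : List String), Dom_infer_form_state_root_py bind_paths → Spec_infer_form_state_root_py bind_paths (infer_form_state_root_py bind_paths)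

-- ===== LEMMAS AND PROOFS =====

theorem pvLcp_nil_left (l : List String) : pvLcp [] l = [] := by
  cases l <;> rfl

theorem pvLcp_nil_right (l : List String) : pvLcp l [] = [] := by
  cases l <;> rfl

theorem foldl_pvLcp_nil (ls : List (List String)) : ls.foldl pvLcp [] = [] := by
  induction ls with
  | nil => rfl
  | cons l ls ih => simpa [pvLcp_nil_left] using ih

-- once some list is empty, the fold yields []
theorem foldl_pvLcp_mem_nil (ls : List (List String)) (hmem : [] ∈ ls) (c : List String) :
    ls.foldl pvLcp c = [] := by
  induction ls generalizing c with
  | nil => cases hmem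
  | cons l ls ih =>
    rcases List.mem_cons.1 hmem with h | h
    · subst h; simp [pvLcp_nil_right, foldl_pvLcp_nil]
    · exact ih h _

-- a nodup list of length 1 consists of one repeated value
theorem len_ofList_one {h : String} {hs : List String}
    (hlen : PySem.Set.len (PySem.Set.ofList (h :: hs)) = 1) : ∀ x ∈ hs, x = h := by
  intro x hx
  have hnd := PySem.Set.nodup_ofList (h :: hs)
  have hmemh : h ∈ PySem.Set.ofList (h :: hs) := (PySem.Set.mem_ofList _ _).2 (by simp)
  have hmemx : x ∈ PySem.Set.ofList (h :: hs) := (PySem.Set.mem_ofList _ _).2 (by simp [hx])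
  rcases (List.length_eq_one_iff).1 (by simpa [PySem.Set.len] using hlen) with ⟨y, hy⟩
  rw [hy] at hmemh hmemx
  simp at hmemh hmemx
  rw [hmemx, hmemh]

theorem len_ofList_one_of_all {h : String} {hs : List String}
    (hall : ∀ x ∈ hs, x = h) : PySem.Set.len (PySem.Set.ofList (h :: hs)) = 1 := by
  have : PySem.Set.ofList (h :: hs) = [h] := by
    have hnd := PySem.Set.nodup_ofList (h :: hs)
    have hsub : ∀ x ∈ PySem.Set.ofList (h :: hs), x = h := by
      intro x hx
      rcases (PySem.Set.mem_ofList _ _).1 hx with hx'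
      rcases List.mem_cons.1 hx' with h1 | h1
      · exact h1
      · exact hall x h1
    have hmemh : h ∈ PySem.Set.ofList (h :: hs) := (PySem.Set.mem_ofList _ _).2 (by simp)
    cases hof : PySem.Set.ofList (h :: hs) with
    | nil => rw [hof] at hmemh; cases hmemh
    | cons y ys =>
      rw [hof] at hsub hnd
      have hy : y = h := hsub y (by simp)
      have : ys = [] := by
        cases ys with
        | nil => rfl
        | cons z zs =>
          have hz : z = h := hsub z (by simp)
          rw [hy, hz] at hnd
          simp at hnd
      simp [hy, this]
  simp [PySem.Set.len, this]

-- all lists in ls start with h: one fold step peels h off everything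
theorem foldl_pvLcp_heads_eq (h : String) :
    ∀ (ls : List (List String)) (hs : List String) (ts : List (List String)),
      pvHeads ls = some (hs, ts) → (∀ x ∈ hs, x = h) →
      ∀ t : List String, ls.foldl pvLcp (h :: t) = h :: ts.foldl pvLcp t := by
  intro ls
  induction ls with
  | nil => intro hs ts hh _ t; cases hh; rfl
  | cons l ls ih =>
    intro hs ts hh hall t
    cases l with
    | nil => simp [pvHeads] at hh
    | cons g gt =>
      simp only [pvHeads] at hh
      cases hrec : pvHeads ls with
      | none => rw [hrec] at hh; simp at hh
      | some p =>
        rcases p with ⟨hs', ts'⟩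
        rw [hrec] at hh
        simp at hh
        rcases hh with ⟨hh1, hh2⟩
        have hg : g = h := by
          have := hall g; rw [← hh1] at this; exact this (by simp)
        subst hg
        have hall' : ∀ x ∈ hs', x = g := by
          intro x hx; exact hall x (by rw [← hh1]; simp [hx])
        subst hh1 hh2
        simp only [List.foldl_cons, pvLcp]
        exact ih _ _ hrec hall' _

-- some list in ls has head ≠ h (or is empty): the fold collapses to []
theorem foldl_pvLcp_heads_ne (h : String) :
    ∀ (ls : List (List String)),
      (∃ l ∈ ls, l.head? ≠ some h) →
      ∀ t : List String, ls.foldl pvLcp (h :: t) = [] := by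
  intro ls
  induction ls with
  | nil => rintro ⟨l, hl, _⟩; cases hl
  | cons l ls ih =>
    rintro ⟨l', hl', hne⟩ t
    rcases List.mem_cons.1 hl' with rfl | hmem
    · cases l' with
      | nil => simp [pvLcp_nil_right, foldl_pvLcp_nil]
      | cons g gt =>
        have hg : g ≠ h := by simpa using hne
        simp only [List.foldl_cons, pvLcp, if_neg (fun e : h = g => hg e.symm)]
        exact foldl_pvLcp_nil ls
    · cases l with
      | nil => simp [pvLcp_nil_right, foldl_pvLcp_nil]
      | cons g gt =>
        by_cases hg : h = g
        · subst hg
          simp only [List.foldl_cons, pvLcp]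
          exact ih ⟨l', hmem, hne⟩ _
        · simp [pvLcp, hg, foldl_pvLcp_nil]

-- pvHeads = none ↔ some member list is empty
theorem pvHeads_none_iff (ls : List (List String)) :
    pvHeads ls = none ↔ [] ∈ ls := by
  induction ls with
  | nil => simp [pvHeads]
  | cons l ls ih =>
    cases l with
    | nil => simp [pvHeads]
    | cons h t =>
      simp only [pvHeads]
      cases hrec : pvHeads ls with
      | none => simpa [hrec] using ih
      | some p =>
        have hnot : [] ∉ ls := fun hmem => by rw [ih.2 hmem] at hrec; cases hrec
        simp [hnot]

theorem pvHeads_some_head? (ls : List (List String)) (hs : List String) (ts : List (List String))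
    (hh : pvHeads ls = some (hs, ts)) :
    ∀ x ∈ hs, ∃ l ∈ ls, l.head? = some x := by
  induction ls generalizing hs ts with
  | nil => cases hh; simp
  | cons l ls ih =>
    cases l with
    | nil => simp [pvHeads] at hh
    | cons g gt =>
      simp only [pvHeads] at hh
      cases hrec : pvHeads ls with
      | none => rw [hrec] at hh; simp at hh
      | some p =>
        rcases p with ⟨hs', ts'⟩
        rw [hrec] at hh
        simp only [Option.some.injEq, Prod.mk.injEq] at hh
        obtain ⟨rfl, rfl⟩ := hh
        intro x hx
        rcases List.mem_cons.1 hx with rfl | hx'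
        · exact ⟨x :: gt, by simp⟩
        · rcases ih _ _ hrec x hx' with ⟨l, hl, hl'⟩
          exact ⟨l, by simp [hl], hl'⟩

-- MAIN BRIDGE: the break-loop over the transpose equals the left fold of pairwise prefixes
theorem commonLoop_zipStar (l0 : List String) :
    ∀ ls : List (List String),
      pvCommonLoop (pvZipStarAux l0 ls) = ls.foldl pvLcp l0 := by
  induction l0 with
  | nil => intro ls; simp [pvZipStarAux, pvCommonLoop, foldl_pvLcp_nil]
  | cons h t ih =>
    intro ls
    simp only [pvZipStarAux]
    cases hh : pvHeads ls with
    | none =>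
      have : [] ∈ ls := (pvHeads_none_iff ls).1 hh
      simp [pvCommonLoop, foldl_pvLcp_mem_nil ls this]
    | some p =>
      rcases p with ⟨hs, ts⟩
      by_cases hall : ∀ x ∈ hs, x = h
      · have hlen := len_ofList_one_of_all hall
        simp only [pvCommonLoop, hlen]
        simp only [ne_eq, not_true_eq_false, if_false, List.headD_cons]
        rw [ih ts, foldl_pvLcp_heads_eq h ls hs ts hh hall t]
      · have hlen : PySem.Set.len (PySem.Set.ofList (h :: hs)) ≠ 1 := by
          intro hc; exact hall (len_ofList_one hc)
        simp only [pvCommonLoop, if_pos hlen]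
        push Not at hall
        obtain ⟨x, hxmem, hxne⟩ := hall
        rcases pvHeads_some_head? ls hs ts hh x hxmem with ⟨l, hl, hl'⟩
        rw [foldl_pvLcp_heads_ne h ls ⟨l, hl, by rw [hl']; simpa using fun e => hxne e⟩ t]

-- ===== VERDICT (by name: the statement is the Claim_ definition above) =====
theorem infer_form_state_root_py_spec : Claim_equal_infer_form_state_root_py := by
  intro bind_paths _
  unfold Spec_infer_form_state_root_py infer_form_state_root_py infer_form_state_root_py_alt
  cases bind_paths with
  | nil => rfl
  | cons p rest =>
    simp only [List.isEmpty_cons, List.map_cons, List.headD_cons, Bool.false_eq_true]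
    rw [pvZipStar, commonLoop_zipStar, List.foldl_map]
    simp
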